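-- pv_equiv track=rewrite | github.com/vinchinzu/euler | python/831.py | poly_mul_trunc
-- ===== SOURCE A (Python) =====
-- DEG = 5  # we only ever need coefficients up to x^5
--
-- def poly_mul_trunc(a: list[int], b: list[int], deg: int = DEG) -> list[int]:
--     """Multiply two polynomials and truncate to degree <= deg."""
--     res = [0] * (deg + 1)
--     for i, ai in enumerate(a):
--         if ai == 0:
--             continue
--         for j, bj in enumerate(b):
--             if bj == 0:
--                 continue
--             k = i + j
--             if k <= deg:
--                 res[k] += ai * bj
--     return res
-- ===== SOURCE B (Python) =====
-- DEG = 5  # we only ever need coefficients up to x^5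
--
-- def poly_mul_trunc(a: list[int], b: list[int], deg: int = DEG) -> list[int]:
--     """Multiply two polynomials and truncate to degree <= deg.
--
--     Gather form: each output coefficient k is one inner sum over the
--     valid a-indices, instead of scattering products into a result list."""
--     return [sum(a[i] * b[k - i] for i in range(len(a)) if 0 <= k - i < len(b))
--             for k in range(deg + 1)]
-- ===== Notes on version B (the rewrite author's own statement) =====
-- stated objective: alternative
-- what changed: Scatter-style nested enumerate loops mutating a result list are replaced by an output-indexed gather: each coefficient k is computed as one comprehension sum of a[i]*b[k-i] over the valid i.
import Mathlib
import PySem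

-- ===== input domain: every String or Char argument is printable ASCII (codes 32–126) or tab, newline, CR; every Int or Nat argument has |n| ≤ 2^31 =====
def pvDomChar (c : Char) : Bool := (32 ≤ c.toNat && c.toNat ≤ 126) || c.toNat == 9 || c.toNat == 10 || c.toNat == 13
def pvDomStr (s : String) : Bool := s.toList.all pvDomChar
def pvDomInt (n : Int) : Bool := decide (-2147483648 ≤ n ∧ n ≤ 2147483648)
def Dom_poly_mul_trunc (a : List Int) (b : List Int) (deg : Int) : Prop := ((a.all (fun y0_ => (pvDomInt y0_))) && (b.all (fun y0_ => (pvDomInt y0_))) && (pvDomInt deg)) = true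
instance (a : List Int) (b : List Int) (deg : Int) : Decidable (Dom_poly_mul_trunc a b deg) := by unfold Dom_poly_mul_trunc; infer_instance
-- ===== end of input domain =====

-- B replaces A's scatter loops (mutating res) by an output-indexed gather sum per coefficient; alternative decomposition, same results.

-- ===== PORT A =====
-- literal port of A: res = [0]*(deg+1); nested enumerate loops with zero-skips; res[k] += ai*bj
-- (reads/writes res[k] only with 0 ≤ k ≤ deg < res.length, so set/getD are exact here)
def poly_mul_trunc (a : List Int) (b : List Int) (deg : Int) : List Int :=
  (PySem.List.enumerate a 0).foldl (fun res p =>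
    if p.2 == 0 then res else
      (PySem.List.enumerate b 0).foldl (fun res q =>
        if q.2 == 0 then res else
          if p.1 + q.1 ≤ deg then
            res.set (p.1 + q.1).toNat (res.getD (p.1 + q.1).toNat 0 + p.2 * q.2)
          else res) res)
    (List.replicate (deg + 1).toNat 0)

-- ===== PORT B =====
-- literal port of B: [sum(a[i]*b[k-i] for i in range(len(a)) if 0 <= k-i < len(b)) for k in range(deg+1)]
-- (a[i] and b[k-i] are read only at guarded in-range nonnegative indices, so getD/.toNat are exact here)
def poly_mul_trunc_alt (a : List Int) (b : List Int) (deg : Int) : List Int :=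
  (PySem.List.pyRange 0 (deg + 1) 1).map (fun k =>
    (((List.range a.length).filter
        (fun (i : Nat) => decide (0 ≤ k - (i : Int) ∧ k - (i : Int) < (b.length : Int)))).map
      (fun (i : Nat) => a.getD i 0 * b.getD (k - (i : Int)).toNat 0)).sum)

-- ===== PRECONDITION & SPEC =====
def Spec_poly_mul_trunc (a : List Int) (b : List Int) (deg : Int) (out : List Int) : Prop := out = poly_mul_trunc_alt a b deg
instance (a : List Int) (b : List Int) (deg : Int) (out : List Int) : Decidable (Spec_poly_mul_trunc a b deg out) := by unfold Spec_poly_mul_trunc; infer_instance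

-- ===== CLAIM (what is proved, stated in full; the proofs are below) =====
def Claim_equal_poly_mul_trunc : Prop := ∀ (a : List Int) (b : List Int) (deg : Int), Dom_poly_mul_trunc a b deg → Spec_poly_mul_trunc a b deg (poly_mul_trunc a b deg)

-- ===== LEMMAS AND PROOFS =====

-- total contribution to output coefficient m of the suffix `rest` of a starting at index i (proof-only helper)
def contrib (b : List Int) (deg : Int) (m : Nat) : List Int → Int → Int
  | [], _ => 0
  | ai :: rest, i =>
      (if 0 ≤ (m : Int) - i ∧ (m : Int) ≤ deg ∧ (m : Int) - i < (b.length : Int)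
        then ai * b.getD ((m : Int) - i).toNat 0 else 0) + contrib b deg m rest (i + 1)

lemma inner_len (deg : Int) (i ai : Int) :
    ∀ (bs : List Int) (j0 : Int) (res : List Int),
      ((PySem.List.enumerate bs j0).foldl (fun res q =>
        if q.2 == 0 then res else
          if i + q.1 ≤ deg then
            res.set (i + q.1).toNat (res.getD (i + q.1).toNat 0 + ai * q.2)
          else res) res).length = res.length := by
  intro bs
  induction bs with
  | nil => intro j0 res; simp [PySem.List.enumerate_nil]
  | cons bj rest ih =>
    intro j0 res
    simp only [PySem.List.enumerate_cons, List.foldl_cons]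
    split_ifs
    · exact ih _ _
    · rw [ih]; simp
    · exact ih _ _

lemma getD_set_eq (l : List Int) (n m : Nat) (v : Int) (hm : m < l.length) :
    (l.set n v).getD m 0 = if n = m then v else l.getD m 0 := by
  rw [List.getD_eq_getElem?_getD, List.getElem?_set]
  by_cases h : n = m
  · subst h
    rw [if_pos rfl, if_pos rfl, if_pos hm]
    rfl
  · rw [if_neg h, if_neg h, List.getD_eq_getElem?_getD]

-- shifting the inner closed-form term one step along b (proof-only helper)
lemma shift_term (deg : Int) (rest : List Int) (bj ai i j0 : Int) (m : Nat)
    (hi : 0 ≤ i) (hj : 0 ≤ j0) (hne : bj = 0 ∨ (m : Int) - i ≠ j0) :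
    (if j0 ≤ (m : Int) - i ∧ (m : Int) ≤ deg ∧ (m : Int) - i - j0 < (((bj :: rest).length : Nat) : Int)
      then ai * (bj :: rest).getD ((m : Int) - i - j0).toNat 0 else 0)
    = (if j0 + 1 ≤ (m : Int) - i ∧ (m : Int) ≤ deg ∧ (m : Int) - i - (j0 + 1) < ((rest.length : Nat) : Int)
      then ai * rest.getD ((m : Int) - i - (j0 + 1)).toNat 0 else 0) := by
  by_cases he : (m : Int) - i = j0
  · have hrneg : ¬(j0 + 1 ≤ (m : Int) - i ∧ (m : Int) ≤ deg ∧ (m : Int) - i - (j0 + 1) < ((rest.length : Nat) : Int)) := by omega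
    rw [if_neg hrneg]
    by_cases hc : j0 ≤ (m : Int) - i ∧ (m : Int) ≤ deg ∧ (m : Int) - i - j0 < (((bj :: rest).length : Nat) : Int)
    · rw [if_pos hc]
      have h0 : ((m : Int) - i - j0).toNat = 0 := by omega
      have hbj : bj = 0 := by rcases hne with h | h; exact h; exact absurd he h
      rw [h0]
      simp [hbj]
    · rw [if_neg hc]
  · by_cases hc : j0 + 1 ≤ (m : Int) - i ∧ (m : Int) ≤ deg ∧ (m : Int) - i - (j0 + 1) < ((rest.length : Nat) : Int)
    · rw [if_pos (by simp only [List.length_cons] at *; push_cast at *; omega), if_pos hc]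
      have hn : ((m : Int) - i - j0).toNat = ((m : Int) - i - (j0 + 1)).toNat + 1 := by omega
      rw [hn, List.getD_cons_succ]
    · rw [if_neg (by simp only [List.length_cons] at *; push_cast at *; omega), if_neg hc]

lemma inner_getD (deg : Int) (i ai : Int) (hi : 0 ≤ i) :
    ∀ (bs : List Int) (j0 : Int) (hj : 0 ≤ j0) (res : List Int)
      (hlen : res.length = (deg + 1).toNat) (m : Nat) (hm : m < res.length),
      ((PySem.List.enumerate bs j0).foldl (fun res q =>
        if q.2 == 0 then res else
          if i + q.1 ≤ deg then
            res.set (i + q.1).toNat (res.getD (i + q.1).toNat 0 + ai * q.2)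
          else res) res).getD m 0
      = res.getD m 0 +
        (if j0 ≤ (m : Int) - i ∧ (m : Int) ≤ deg ∧ (m : Int) - i - j0 < (bs.length : Int)
          then ai * bs.getD ((m : Int) - i - j0).toNat 0 else 0) := by
  intro bs
  induction bs with
  | nil =>
    intro j0 hj res hlen m hm
    simp only [PySem.List.enumerate_nil, List.foldl_nil, List.length_nil]
    rw [if_neg (by push_cast; omega)]
    ring
  | cons bj rest ih =>
    intro j0 hj res hlen m hm
    simp only [PySem.List.enumerate_cons, List.foldl_cons]
    by_cases hbj : (bj == 0) = true
    · rw [if_pos hbj]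
      rw [ih (j0 + 1) (by omega) res hlen m hm]
      rw [shift_term deg rest bj ai i j0 m hi hj (Or.inl (by simpa using hbj))]
    · rw [if_neg hbj]
      by_cases hk : i + j0 ≤ deg
      · rw [if_pos hk]
        rw [ih (j0 + 1) (by omega) _ (by rw [List.length_set]; exact hlen)
            m (by rw [List.length_set]; exact hm)]
        by_cases he : (m : Int) - i = j0
        · have hKm : (i + j0).toNat = m := by omega
          rw [hKm, getD_set_eq res m m _ hm, if_pos rfl]
          rw [if_neg (by omega)]
          rw [if_pos (by simp only [List.length_cons]; push_cast; omega)]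
          have h0 : ((m : Int) - i - j0).toNat = 0 := by omega
          rw [h0]
          simp only [List.getD_cons_zero]
          ring
        · have hKm : (i + j0).toNat ≠ m := by omega
          rw [getD_set_eq res _ m _ hm, if_neg hKm]
          rw [shift_term deg rest bj ai i j0 m hi hj (Or.inr he)]
      · rw [if_neg hk]
        rw [ih (j0 + 1) (by omega) res hlen m hm]
        congr 1
        rw [if_neg (by omega), if_neg (by omega)]

lemma outer_len (b : List Int) (deg : Int) :
    ∀ (as_ : List Int) (i0 : Int) (res : List Int),
      ((PySem.List.enumerate as_ i0).foldl (fun res p =>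
        if p.2 == 0 then res else
          (PySem.List.enumerate b 0).foldl (fun res q =>
            if q.2 == 0 then res else
              if p.1 + q.1 ≤ deg then
                res.set (p.1 + q.1).toNat (res.getD (p.1 + q.1).toNat 0 + p.2 * q.2)
              else res) res) res).length = res.length := by
  intro as_
  induction as_ with
  | nil => intro i0 res; simp [PySem.List.enumerate_nil]
  | cons ai rest ih =>
    intro i0 res
    simp only [PySem.List.enumerate_cons, List.foldl_cons]
    split_ifs
    · exact ih _ _
    · rw [ih]; exact inner_len deg i0 ai b 0 res

lemma outer_getD (b : List Int) (deg : Int) :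
    ∀ (as_ : List Int) (i0 : Int) (h0 : 0 ≤ i0) (res : List Int)
      (hlen : res.length = (deg + 1).toNat) (m : Nat) (hm : m < res.length),
      ((PySem.List.enumerate as_ i0).foldl (fun res p =>
        if p.2 == 0 then res else
          (PySem.List.enumerate b 0).foldl (fun res q =>
            if q.2 == 0 then res else
              if p.1 + q.1 ≤ deg then
                res.set (p.1 + q.1).toNat (res.getD (p.1 + q.1).toNat 0 + p.2 * q.2)
              else res) res) res).getD m 0
      = res.getD m 0 + contrib b deg m as_ i0 := by
  intro as_
  induction as_ with
  | nil => intro i0 h0 res hlen m hm; simp [PySem.List.enumerate_nil, contrib]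
  | cons ai rest ih =>
    intro i0 h0 res hlen m hm
    simp only [PySem.List.enumerate_cons, List.foldl_cons, contrib]
    by_cases hai : (ai == 0) = true
    · rw [if_pos hai]
      rw [ih (i0 + 1) (by omega) res hlen m hm]
      have hz : ai = 0 := by simpa using hai
      rw [hz]
      simp
    · rw [if_neg hai]
      rw [ih (i0 + 1) (by omega) _ (by rw [inner_len]; exact hlen)
          m (by rw [inner_len]; exact hm)]
      rw [inner_getD deg i0 ai h0 b 0 le_rfl res hlen m hm]
      rw [sub_zero]
      ring

lemma sum_filter_map_eq_sum_ite (p : Nat → Bool) (f : Nat → Int) :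
    ∀ (l : List Nat), ((l.filter p).map f).sum = (l.map (fun x => if p x then f x else 0)).sum := by
  intro l
  induction l with
  | nil => simp
  | cons x t ih =>
    by_cases h : p x <;> simp [h, ih]

lemma contrib_eq_sum (b : List Int) (deg : Int) (m : Nat) (hm : (m : Int) ≤ deg) :
    ∀ (a : List Int) (i0 : Int),
      contrib b deg m a i0
      = ((List.range a.length).map (fun (i : Nat) =>
          if decide (0 ≤ (m : Int) - (i0 + i) ∧ (m : Int) - (i0 + i) < (b.length : Int))
            then a.getD i 0 * b.getD ((m : Int) - (i0 + i)).toNat 0 else 0)).sum := by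
  intro a
  induction a with
  | nil => intro i0; simp [contrib]
  | cons ai rest ih =>
    intro i0
    simp only [contrib, List.length_cons, List.range_succ_eq_map, List.map_cons, List.sum_cons,
      List.map_map]
    congr 1
    · simp only [decide_eq_true_eq, Nat.cast_zero, add_zero, List.getD_cons_zero]
      split_ifs with h1 h2 h3
      · rfl
      · exfalso; omega
      · exfalso; omega
      · rfl
    · rw [ih (i0 + 1)]
      refine congrArg List.sum (List.map_congr_left ?_)
      intro x _
      simp only [Function.comp_apply, decide_eq_true_eq]
      have he : i0 + ((x.succ : Nat) : Int) = (i0 + 1) + (x : Int) := by push_cast; ring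
      rw [he, List.getD_cons_succ]

-- ===== VERDICT (by name: the statement is the Claim_ definition above) =====
theorem poly_mul_trunc_spec : Claim_equal_poly_mul_trunc := by
  intro a b deg _
  unfold Spec_poly_mul_trunc poly_mul_trunc poly_mul_trunc_alt
  apply List.ext_getElem
  · rw [outer_len, List.length_replicate, List.length_map, PySem.List.length_pyRange_one]
    omega
  · intro m h1 h2
    have hlen : (List.replicate (deg + 1).toNat (0 : Int)).length = (deg + 1).toNat := by
      simp
    have hm : m < (List.replicate (deg + 1).toNat (0 : Int)).length := by
      rw [hlen]
      rw [outer_len, List.length_replicate] at h1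
      exact h1
    have hmd : (m : Int) ≤ deg := by
      rw [List.length_map, PySem.List.length_pyRange_one] at h2
      omega
    rw [← List.getD_eq_getElem _ 0 h1, ← List.getD_eq_getElem _ 0 h2]
    rw [outer_getD b deg a 0 le_rfl _ hlen m hm]
    have hrep : (List.replicate (deg + 1).toNat (0 : Int)).getD m 0 = 0 := by
      rw [List.getD_eq_getElem _ 0 hm, List.getElem_replicate]
    rw [hrep, zero_add]
    have h2' : m < (PySem.List.pyRange 0 (deg + 1) 1).length := by
      rw [List.length_map] at h2
      exact h2
    rw [List.getD_eq_getElem?_getD, List.getElem?_map,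
      List.getElem?_eq_getElem h2', PySem.List.getElem_pyRange_one]
    simp only [Option.map_some, Option.getD_some, zero_add]
    rw [sum_filter_map_eq_sum_ite]
    rw [contrib_eq_sum b deg m hmd a 0]
    refine congrArg List.sum (List.map_congr_left ?_)
    intro x _
    rw [zero_add]
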